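-- pv_equiv track=rewrite | github.com/tanishabisht/Algorithms-Leetcode | BinarySearch/easy-2529.py | find_last_negative
-- ===== SOURCE A (Python) =====
-- def find_last_negative(nums):
--     left = 0
--     right = len(nums)
--     while left < right:
--         mid = (right+left) // 2
--         if nums[mid] >= 0:
--             right = mid
--         else:
--             left = mid + 1
--     return left - 1
-- ===== SOURCE B (Python) =====
-- def find_last_negative(nums):
--     # Slice-based divide and conquer: recurse on an actual sublist, carrying
--     # the absolute offset of its first element.
--     def search(sub, base):
--         if not sub:
--             return base
--         mid = len(sub) // 2
--         if sub[mid] < 0: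
--             return search(sub[mid + 1:], base + mid + 1)
--         return search(sub[:mid], base)
--     return search(nums, 0) - 1
-- ===== Notes on version B (the rewrite author's own statement) =====
-- stated objective: alternative
-- what changed: Replaces the iterative while-loop over index bounds by a divide-and-conquer recursion on actual list slices (sub[:mid] / sub[mid+1:]) carrying an offset accumulator; correct because l+(r-l)//2 equals (l+r)//2, so the same elements are probed.
import Mathlib
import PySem

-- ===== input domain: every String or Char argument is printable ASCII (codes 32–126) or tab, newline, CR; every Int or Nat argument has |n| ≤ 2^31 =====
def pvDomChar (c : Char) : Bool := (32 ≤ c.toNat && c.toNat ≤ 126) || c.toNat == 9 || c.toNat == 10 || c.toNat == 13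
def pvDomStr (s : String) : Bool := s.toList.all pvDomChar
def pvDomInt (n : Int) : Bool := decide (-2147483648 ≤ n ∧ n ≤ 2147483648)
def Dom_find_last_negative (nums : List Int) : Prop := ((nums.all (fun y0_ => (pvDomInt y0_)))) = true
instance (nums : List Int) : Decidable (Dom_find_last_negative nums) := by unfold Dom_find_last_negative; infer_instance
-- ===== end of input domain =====

-- B replaces A's iterative index-bounds while-loop by a divide-and-conquer recursion on list slices with an offset accumulator (alternative decomposition).


-- ===== PORT A =====
-- A's while-loop over mutable Int state (left, right); nums[mid] is always in
-- range when the loop body runs, so the pyGet? default is never taken.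
def findLastNegLoopA (nums : List Int) (left right : Int) : Int :=
  if left < right then
    let mid := PySem.Int.floordiv (right + left) 2
    if (PySem.List.pyGet? nums mid).getD 0 ≥ 0 then
      findLastNegLoopA nums left mid
    else
      findLastNegLoopA nums (mid + 1) right
  else
    left
termination_by (right - left).toNat
decreasing_by
  all_goals
    rw [PySem.Int.floordiv_eq_ediv_of_pos (by norm_num)]
    omega

def find_last_negative (nums : List Int) : Int :=
  findLastNegLoopA nums 0 (nums.length : Int) - 1

-- ===== PORT B =====
-- B's slice recursion: sub is the current sublist, base the absolute index of
-- its first element; sub[mid] is in range, so getD's default is never taken.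
def findLastNegSearchB (sub : List Int) (base : Int) : Int :=
  if h : sub = [] then base
  else
    let mid := sub.length / 2
    if sub.getD mid 0 < 0 then
      findLastNegSearchB (sub.drop (mid + 1)) (base + (mid : Int) + 1)
    else
      findLastNegSearchB (sub.take mid) base
termination_by sub.length
decreasing_by
  all_goals
    have hpos : 0 < sub.length := List.length_pos_of_ne_nil h
    simp
    omega

def find_last_negative_alt (nums : List Int) : Int :=
  findLastNegSearchB nums 0 - 1

-- ===== PRECONDITION & SPEC =====
def Spec_find_last_negative (nums : List Int) (out : Int) : Prop := out = find_last_negative_alt nums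
instance (nums : List Int) (out : Int) : Decidable (Spec_find_last_negative nums out) := by unfold Spec_find_last_negative; infer_instance

-- ===== CLAIM (what is proved, stated in full; the proofs are below) =====
def Claim_equal_find_last_negative : Prop := ∀ (nums : List Int), Dom_find_last_negative nums → Spec_find_last_negative nums (find_last_negative nums)

-- ===== LEMMAS AND PROOFS =====

-- The loop on bounds [l, r) computes the same as the slice recursion on
-- nums[l:r] with offset l; note l + (r-l)/2 = (l+r)/2.
theorem findLastNeg_loop_eq_search_aux (nums : List Int) : ∀ (n l r : Nat), r - l ≤ n →
    r ≤ nums.length →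
    findLastNegLoopA nums (l : Int) (r : Int) =
      findLastNegSearchB ((nums.drop l).take (r - l)) (l : Int) := by
  intro n
  induction n with
  | zero =>
    intro l r h hr
    have hrl : r - l = 0 := by omega
    rw [findLastNegLoopA, findLastNegSearchB]
    have h1 : ¬ ((l : Int) < (r : Int)) := by omega
    simp [h1, hrl]
  | succ n ih =>
    intro l r h hr
    by_cases hlr : l < r
    · have hlen : ((nums.drop l).take (r - l)).length = r - l := by
        simp; omega
      have hne : (nums.drop l).take (r - l) ≠ [] := by
        intro he; rw [he] at hlen; simp at hlen; omega
      rw [findLastNegLoopA, findLastNegSearchB]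
      have hlt : (l : Int) < (r : Int) := by exact_mod_cast hlr
      rw [if_pos hlt, dif_neg hne]
      have hmabs : PySem.Int.floordiv ((r : Int) + (l : Int)) 2 = ((l + (r - l) / 2 : Nat) : Int) := by
        rw [PySem.Int.floordiv_eq_ediv_of_pos (by norm_num)]
        omega
      have hmr : l + (r - l) / 2 < r := by omega
      have hm2 : (r - l) / 2 < r - l := by omega
      have hget : ((nums.drop l).take (r - l)).getD ((r - l) / 2) 0
          = nums.getD (l + (r - l) / 2) 0 := by
        simp [List.getD_eq_getElem?_getD, List.getElem?_take, List.getElem?_drop, hm2]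
      have hgetA : (PySem.List.pyGet? nums ((l + (r - l) / 2 : Nat) : Int)).getD 0
          = nums.getD (l + (r - l) / 2) 0 := by
        rw [PySem.List.pyGet?_natCast]
        simp [List.getD_eq_getElem?_getD]
      simp only [hmabs, hgetA, hget, hlen]
      by_cases hv : nums.getD (l + (r - l) / 2) 0 < 0
      · have hv' : ¬ nums.getD (l + (r - l) / 2) 0 ≥ 0 := by omega
        rw [if_neg hv', if_pos hv]
        have hdrop : ((nums.drop l).take (r - l)).drop ((r - l) / 2 + 1)
            = (nums.drop (l + (r - l) / 2 + 1)).take (r - (l + (r - l) / 2 + 1)) := by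
          rw [List.drop_take, List.drop_drop]
          congr 1
          omega
        have hc1 : ((l + (r - l) / 2 : Nat) : Int) + 1 = ((l + (r - l) / 2 + 1 : Nat) : Int) := by
          push_cast; ring
        have hc2 : (l : Int) + (((r - l) / 2 : Nat) : Int) + 1 = ((l + (r - l) / 2 + 1 : Nat) : Int) := by
          push_cast; ring
        rw [hdrop, hc1, hc2]
        exact ih (l + (r - l) / 2 + 1) r (by omega) hr
      · have hv' : nums.getD (l + (r - l) / 2) 0 ≥ 0 := by omega
        rw [if_pos hv', if_neg hv]
        have htake : ((nums.drop l).take (r - l)).take ((r - l) / 2)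
            = (nums.drop l).take ((l + (r - l) / 2) - l) := by
          rw [List.take_take]
          congr 1
          omega
        rw [htake]
        exact ih l (l + (r - l) / 2) (by omega) (by omega)
    · rw [findLastNegLoopA, findLastNegSearchB]
      have h1 : ¬ ((l : Int) < (r : Int)) := by omega
      have h2 : r - l = 0 := by omega
      simp [h1, h2]

-- ===== VERDICT (by name: the statement is the Claim_ definition above) =====
theorem find_last_negative_spec : Claim_equal_find_last_negative := by
  intro nums _
  show _ = _
  unfold find_last_negative find_last_negative_alt
  have h := findLastNeg_loop_eq_search_aux nums nums.length 0 nums.length (by omega) (le_refl _)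
  simpa using h
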